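-- pv_equiv track=rewrite | github.com/CatEatSad/hungnk | ptit-random-dict/ptit-random-dict/make_dicts.py | classify_full_stream
-- ===== SOURCE A (Python) =====
-- from collections import defaultdict
--
-- def classify_full_stream(words, bitstring):
--     """
--     Duyệt toàn bộ chuỗi bit 2 bit một, ánh xạ lần lượt tới các từ (vòng qua danh sách khi hết).
--     Thu thập tất cả các từ được ánh xạ vào từng nhóm unique.
--     """
--     n = len(words)
--     pairs = [bitstring[i:i + 2] for i in range(0, len(bitstring) - len(bitstring) % 2, 2)]
--     groups = defaultdict(list)
--
--     for idx, code in enumerate(pairs):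
--         if code not in ('00', '01', '10', '11'):
--             continue
--         word = words[idx % n]
--         # đưa từ vào nhóm nếu chưa có
--         if word not in groups[code]:
--             groups[code].append(word)
--     # đảm bảo 4 nhóm luôn có key
--     for c in ('00', '01', '10', '11'):
--         groups.setdefault(c, [])
--     return groups
-- ===== SOURCE B (Python) =====
-- from collections import defaultdict
--
-- def classify_full_stream(words, bitstring):
--     """Collect-then-dedup: gather raw words per code in one pass over the
--     string (no pairs list, no membership test), then deduplicate each bucket
--     once via dict.fromkeys."""
--     n = len(words)
--     buckets = {}
--     for i in range(0, len(bitstring) // 2 * 2, 2):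
--         code = bitstring[i:i + 2]
--         if code in ('00', '01', '10', '11'):
--             buckets.setdefault(code, []).append(words[(i // 2) % n])
--     out = defaultdict(list)
--     for code, ws in buckets.items():
--         out[code] = list(dict.fromkeys(ws))
--     for c in ('00', '01', '10', '11'):
--         out.setdefault(c, [])
--     return out
-- ===== Notes on version B (the rewrite author's own statement) =====
-- stated objective: alternative
-- what changed: B scans the bit pairs once collecting raw (undeduplicated) words per code into buckets, then deduplicates each bucket once with dict.fromkeys in a second pass, instead of A's pairs-list plus per-element membership test against the growing group inside the loop.
import Mathlib
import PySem

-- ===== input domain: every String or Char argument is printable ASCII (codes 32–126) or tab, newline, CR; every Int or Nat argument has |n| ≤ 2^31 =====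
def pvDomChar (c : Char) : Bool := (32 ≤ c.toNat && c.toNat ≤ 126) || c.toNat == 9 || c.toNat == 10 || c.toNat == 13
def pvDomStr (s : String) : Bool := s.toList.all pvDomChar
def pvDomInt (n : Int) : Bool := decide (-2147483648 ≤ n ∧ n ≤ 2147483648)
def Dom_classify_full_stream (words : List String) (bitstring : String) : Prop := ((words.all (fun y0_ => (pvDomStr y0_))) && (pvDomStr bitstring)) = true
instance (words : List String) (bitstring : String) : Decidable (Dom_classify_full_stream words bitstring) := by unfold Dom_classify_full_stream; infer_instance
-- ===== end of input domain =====

-- B collects raw words per code in one pass and deduplicates each bucket once at the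
-- end (collect-then-dedup), instead of A's membership test inside the loop; objective: alternative.

-- ===== PORT A =====
-- one loop iteration of A: 'if code not in (...): continue; word = words[idx % n]; if word not in groups[code]: groups[code].append(word)'
-- (the defaultdict access groups[code] creates the key with [] before the membership test)
def pvStepA (words : List String) (n : Int) (g : PySem.Dict String (List String)) (p : Int × String) : PySem.Dict String (List String) :=
  if p.2 = "00" ∨ p.2 = "01" ∨ p.2 = "10" ∨ p.2 = "11" then
    match PySem.Int.mod? p.1 n with            -- idx % n (none = ZeroDivisionError, excluded by Pre_)
    | some j =>
      match PySem.List.pyGet? words j with     -- words[idx % n]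
      | some word =>
        let g' := if g.contains p.2 then g else g.insert p.2 []   -- defaultdict access groups[code]
        let cur := g'.getD p.2 []
        if word ∈ cur then g' else g'.insert p.2 (cur ++ [word])
      | none => g
    | none => g
  else g

def classify_full_stream (words : List String) (bitstring : String) : List (String × List String) :=
  let n : Int := (words.length : Int)
  let pairs : List String :=
    (PySem.List.pyRange 0 (PySem.Str.len bitstring - PySem.Int.mod (PySem.Str.len bitstring) 2) 2).map
      (fun i => PySem.Str.slice bitstring (some i) (some (i + 2)))
  let groups := (PySem.List.enumerate pairs 0).foldl (pvStepA words n) PySem.Dict.empty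
  let groups := ["00", "01", "10", "11"].foldl (fun g c => g.setdefault c []) groups
  groups.items

-- ===== PORT B =====
-- one loop iteration of B: 'code = bitstring[i:i+2]; if code in (...): buckets.setdefault(code, []).append(words[(i // 2) % n])'
def pvStepB (words : List String) (n : Int) (bitstring : String) (b : PySem.Dict String (List String)) (i : Int) : PySem.Dict String (List String) :=
  let code := PySem.Str.slice bitstring (some i) (some (i + 2))
  if code = "00" ∨ code = "01" ∨ code = "10" ∨ code = "11" then
    match PySem.Int.mod? (PySem.Int.floordiv i 2) n with      -- (i // 2) % n
    | some j =>
      match PySem.List.pyGet? words j with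
      | some word =>
        let b' := b.setdefault code []                        -- buckets.setdefault(code, [])
        b'.insert code (b'.getD code [] ++ [word])            -- .append(word)
      | none => b
    | none => b
  else b

def classify_full_stream_alt (words : List String) (bitstring : String) : List (String × List String) :=
  let n : Int := (words.length : Int)
  let buckets := (PySem.List.pyRange 0 (PySem.Int.floordiv (PySem.Str.len bitstring) 2 * 2) 2).foldl
      (pvStepB words n bitstring) PySem.Dict.empty
  let out := buckets.items.foldl
      (fun (o : PySem.Dict String (List String)) p => o.insert p.1 (PySem.List.dedup p.2)) PySem.Dict.empty
  let out := ["00", "01", "10", "11"].foldl (fun o c => o.setdefault c []) out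
  out.items

-- ===== PRECONDITION & SPEC =====
def pvIsBit (c : Char) : Bool := c = '0' || c = '1'

-- does the bitstring contain a full 2-bit pair ('00'/'01'/'10'/'11') at an even position?
def pvHasCode : List Char → Bool
  | a :: b :: r => (pvIsBit a && pvIsBit b) || pvHasCode r
  | _ => false

-- Pre_ excludes exactly the inputs where Python A raises ZeroDivisionError ('idx % n' with
-- words empty, reached iff some valid 2-bit code occurs); A returns normally everywhere else.
def Pre_classify_full_stream (words : List String) (bitstring : String) : Prop :=
  words ≠ [] ∨ pvHasCode bitstring.toList = false
instance (words : List String) (bitstring : String) : Decidable (Pre_classify_full_stream words bitstring) := by unfold Pre_classify_full_stream; infer_instance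

def pvWitness_classify_full_stream : List String × String := (["alpha", "beta"], "0110x1")

def Spec_classify_full_stream (words : List String) (bitstring : String) (out : List (String × List String)) : Prop := out = classify_full_stream_alt words bitstring
instance (words : List String) (bitstring : String) (out : List (String × List String)) : Decidable (Spec_classify_full_stream words bitstring out) := by unfold Spec_classify_full_stream; infer_instance

-- ===== CLAIM (what is proved, stated in full; the proofs are below) =====
def Claim_equal_classify_full_stream : Prop := ∀ (words : List String) (bitstring : String), Dom_classify_full_stream words bitstring → Pre_classify_full_stream words bitstring → Spec_classify_full_stream words bitstring (classify_full_stream words bitstring)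

-- ===== LEMMAS AND PROOFS =====

-- the value map relating A's groups to B's raw buckets
def pvF (p : String × List String) : String × List String := (p.1, PySem.List.dedup p.2)

-- invariant between A's dict and B's dict during the main loop
def pvInv (g b : PySem.Dict String (List String)) : Prop :=
  g.items = b.items.map pvF ∧ b.keys.Nodup

theorem pvInv_get? {g b : PySem.Dict String (List String)} (h : pvInv g b) (k : String) :
    g.get? k = (b.get? k).map PySem.List.dedup := by
  obtain ⟨h1, -⟩ := h
  simp only [PySem.Dict.get?, h1, List.find?_map]
  have : ((fun p : String × List String => p.1 == k) ∘ pvF) = (fun p => p.1 == k) := rfl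
  rw [this, Option.map_map, Option.map_map]
  rfl

theorem pvInv_contains {g b : PySem.Dict String (List String)} (h : pvInv g b) (k : String) :
    g.contains k = b.contains k := by
  rw [PySem.Dict.contains_eq_isSome_get?, PySem.Dict.contains_eq_isSome_get?, pvInv_get? h]
  cases b.get? k <;> rfl

theorem pv_dedup_snoc (v : List String) (w : String) :
    PySem.List.dedup (v ++ [w]) =
      if w ∈ PySem.List.dedup v then PySem.List.dedup v else PySem.List.dedup v ++ [w] := by
  simp only [PySem.List.dedup, PySem.Set.ofList, List.foldl_append, List.foldl_cons, List.foldl_nil]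
  simp [PySem.Set.add, PySem.Set.contains]

-- inserting v on the B side corresponds to inserting (dedup v) on the A side
theorem pvInv_insert {g b : PySem.Dict String (List String)} (h : pvInv g b) (k : String) (v : List String) :
    pvInv (g.insert k (PySem.List.dedup v)) (b.insert k v) := by
  obtain ⟨h1, h2⟩ := h
  refine ⟨?_, PySem.Dict.nodup_keys_insert b k v h2⟩
  have hc : g.contains k = b.contains k := pvInv_contains ⟨h1, h2⟩ k
  cases hcb : b.contains k with
  | true =>
    rw [PySem.Dict.items_insert_of_contains _ _ (hc.trans hcb),
        PySem.Dict.items_insert_of_contains _ _ hcb, h1, List.map_map, List.map_map]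
    refine List.map_congr_left ?_
    intro p _
    by_cases hpk : p.1 = k <;> simp [pvF, hpk]
  | false =>
    rw [PySem.Dict.items_insert_of_not_contains _ _ (hc.trans hcb),
        PySem.Dict.items_insert_of_not_contains _ _ hcb, h1, List.map_append]
    rfl

-- re-inserting the value a nodup-keyed dict already stores changes nothing
theorem pv_replace_map_eq (k : String) (v : List String) :
    ∀ (l : List (String × List String)), (l.map Prod.fst).Nodup →
      (l.find? (fun p => p.1 == k)).map Prod.snd = some v →
      l.map (fun p => if p.1 == k then (k, v) else p) = l := by
  intro l
  induction l with
  | nil => intro _ hf; simp at hf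
  | cons p t ih =>
    intro hnd hf
    simp only [List.map_cons, List.nodup_cons] at hnd ⊢
    by_cases hpk : p.1 = k
    · rw [List.find?_cons_of_pos (by simp [hpk])] at hf
      simp only [Option.map_some, Option.some.injEq] at hf
      have hp : p = (k, v) := by cases p; simp_all
      have ht : t.map (fun q => if q.1 == k then (k, v) else q) = t := by
        refine (List.map_congr_left ?_).trans t.map_id
        intro q hq
        have hqk : q.1 ≠ k := by
          intro hqe
          exact hnd.1 (hpk ▸ hqe ▸ List.mem_map_of_mem hq)
        simp [hqk]
      rw [ht]
      simp [hp]
    · rw [List.find?_cons_of_neg (by simp [hpk])] at hf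
      rw [ih hnd.2 hf]
      simp [hpk]

theorem pv_insert_self_eq {d : PySem.Dict String (List String)} {k : String} {v : List String}
    (hnd : d.keys.Nodup) (hv : d.get? k = some v) : d.insert k v = d := by
  apply PySem.Dict.ext
  have hc : d.contains k = true := by rw [PySem.Dict.contains_eq_isSome_get?, hv]; rfl
  rw [PySem.Dict.items_insert_of_contains _ _ hc]
  have := pv_replace_map_eq k v d.items hnd (by simpa [PySem.Dict.get?] using hv)
  simpa using this

-- one loop iteration preserves the invariant (for any index value i = 2k)
theorem pvStep_inv (words : List String) (n : Int) (bitstring : String) (k : Nat)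
    {g b : PySem.Dict String (List String)} (h : pvInv g b) :
    pvInv (pvStepA words n g ((k : Int), PySem.Str.slice bitstring (some (0 + 2 * (k : Int))) (some (0 + 2 * (k : Int) + 2))))
          (pvStepB words n bitstring b (0 + 2 * (k : Int))) := by
  unfold pvStepA pvStepB
  have hdiv : PySem.Int.floordiv (0 + 2 * (k : Int)) 2 = (k : Int) := by
    rw [PySem.Int.floordiv_eq_ediv_of_pos (by norm_num)]; omega
  rw [hdiv]
  set code := PySem.Str.slice bitstring (some (0 + 2 * (k : Int))) (some (0 + 2 * (k : Int) + 2)) with hcode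
  by_cases hv : code = "00" ∨ code = "01" ∨ code = "10" ∨ code = "11"
  · simp only [if_pos hv]
    cases hm : PySem.Int.mod? (k : Int) n with
    | none => dsimp only; exact h
    | some j =>
      dsimp only
      cases hg : PySem.List.pyGet? words j with
      | none => dsimp only; exact h
      | some word =>
        dsimp only
        have hc := pvInv_contains h code
        cases hcb : b.contains code with
        | false =>
          -- fresh key on both sides
          rw [PySem.Dict.setdefault_of_not_contains _ _ hcb]
          simp only [hc.trans hcb, if_false, Bool.false_eq_true]
          rw [PySem.Dict.getD_insert_self, PySem.Dict.getD_insert_self]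
          rw [if_neg (by simp : ¬ word ∈ ([] : List String))]
          simp only [List.nil_append]
          rw [PySem.Dict.insert_insert_self, PySem.Dict.insert_insert_self]
          have : PySem.List.dedup [word] = [word] := rfl
          rw [← this]
          exact pvInv_insert h code [word]
        | true =>
          -- key already present, with some stored list bv on the B side
          rw [PySem.Dict.setdefault_of_contains _ _ hcb]
          simp only [hc.trans hcb, if_true]
          obtain ⟨bv, hbv⟩ : ∃ bv, b.get? code = some bv := by
            rw [PySem.Dict.contains_eq_isSome_get?] at hcb
            cases hx : b.get? code
            · rw [hx] at hcb; simp at hcb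
            · exact ⟨_, rfl⟩
          have hga : g.getD code [] = PySem.List.dedup bv := by
            rw [PySem.Dict.getD_eq_get?_getD, pvInv_get? h, hbv]; rfl
          have hgb : b.getD code [] = bv := by rw [PySem.Dict.getD_eq_get?_getD, hbv]; rfl
          rw [hga, hgb]
          by_cases hw : word ∈ PySem.List.dedup bv
          · simp only [if_pos hw]
            have hins := pvInv_insert h code (bv ++ [word])
            have hdd : PySem.List.dedup (bv ++ [word]) = PySem.List.dedup bv := by
              rw [pv_dedup_snoc, if_pos hw]
            rw [hdd] at hins
            have hgnd : g.keys.Nodup := by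
              obtain ⟨h1, h2⟩ := h
              have : g.keys = b.keys := by
                simp only [PySem.Dict.keys, h1, List.map_map]; rfl
              rw [this]; exact h2
            have : g.insert code (PySem.List.dedup bv) = g :=
              pv_insert_self_eq hgnd (by rw [pvInv_get? h, hbv]; rfl)
            rwa [this] at hins
          · simp only [if_neg hw]
            have hdd : PySem.List.dedup bv ++ [word] = PySem.List.dedup (bv ++ [word]) := by
              rw [pv_dedup_snoc, if_neg hw]
            rw [hdd]
            exact pvInv_insert h code (bv ++ [word])
  · simp only [if_neg hv]
    exact h

theorem pvFold_inv (words : List String) (n : Int) (bitstring : String) (ks : List Nat)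
    {g b : PySem.Dict String (List String)} (h : pvInv g b) :
    pvInv (ks.foldl (fun g (k : Nat) => pvStepA words n g ((k : Int), PySem.Str.slice bitstring (some (0 + 2 * (k : Int))) (some (0 + 2 * (k : Int) + 2)))) g)
          (ks.foldl (fun b (k : Nat) => pvStepB words n bitstring b (0 + 2 * (k : Int))) b) := by
  induction ks generalizing g b with
  | nil => exact h
  | cons k t ih => exact ih (pvStep_inv words n bitstring k h)

theorem pv_enumerate_map {α β : Type} (f : α → β) (l : List α) (s : Int) :
    PySem.List.enumerate (l.map f) s = (PySem.List.enumerate l s).map (fun p => (p.1, f p.2)) := by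
  induction l generalizing s with
  | nil => simp [PySem.List.enumerate_nil]
  | cons x t ih => simp [PySem.List.enumerate_cons, ih]

theorem pv_enumerate_range (m : Nat) :
    PySem.List.enumerate (List.range m) 0 = (List.range m).map (fun k : Nat => ((k : Int), k)) := by
  induction m with
  | zero => simp [PySem.List.enumerate_nil]
  | succ m ih =>
    rw [List.range_succ, PySem.List.enumerate_append, ih, List.map_append]
    simp [PySem.List.enumerate_cons, PySem.List.enumerate_nil]

-- both loop bounds describe the same index list {0, 2, …, 2m-2}, m = len/2
theorem pv_pyRange_two (m : Nat) :
    PySem.List.pyRange 0 ((2 * m : Nat) : Int) 2 = (List.range m).map (fun k : Nat => 0 + 2 * (k : Int)) := by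
  rw [PySem.List.pyRange_of_pos 0 _ (by norm_num)]
  have hcnt : (if (0 : Int) < ((2 * m : Nat) : Int) then ((((2 * m : Nat) : Int) - 0 + 2 - 1) / 2).toNat else 0) = m := by
    split_ifs with h <;> [skip; skip] <;> push_cast at * <;> omega
  rw [hcnt]

theorem pv_nodup_out_keys (words : List String) (n : Int) (bitstring : String) (ks : List Nat)
    {b : PySem.Dict String (List String)} (h : b.keys.Nodup) :
    (ks.foldl (fun b (k : Nat) => pvStepB words n bitstring b (0 + 2 * (k : Int))) b).keys.Nodup := by
  induction ks generalizing b with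
  | nil => exact h
  | cons k t ih =>
    refine ih ?_
    unfold pvStepB
    dsimp only
    split
    · cases hm : PySem.Int.mod? (PySem.Int.floordiv (0 + 2 * (k : Int)) 2) n with
      | none => dsimp only; exact h
      | some j =>
        dsimp only
        cases hg : PySem.List.pyGet? words j with
        | none => dsimp only; exact h
        | some w =>
          dsimp only
          cases hc : b.contains (PySem.Str.slice bitstring (some (0 + 2 * (k : Int))) (some (0 + 2 * (k : Int) + 2))) with
          | true =>
            rw [PySem.Dict.setdefault_of_contains _ _ hc]
            exact PySem.Dict.nodup_keys_insert _ _ _ h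
          | false =>
            rw [PySem.Dict.setdefault_of_not_contains _ _ hc]
            exact PySem.Dict.nodup_keys_insert _ _ _ (PySem.Dict.nodup_keys_insert _ _ _ h)
    · exact h

theorem classify_full_stream_eq (words : List String) (bitstring : String) :
    classify_full_stream words bitstring = classify_full_stream_alt words bitstring := by
  unfold classify_full_stream classify_full_stream_alt
  set n : Int := (words.length : Int) with hn
  set L : Nat := bitstring.toList.length with hL
  set m : Nat := L / 2 with hm
  have hbndA : PySem.Str.len bitstring - PySem.Int.mod (PySem.Str.len bitstring) 2 = ((2 * m : Nat) : Int) := by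
    rw [PySem.Str.len_eq, PySem.Int.mod_eq_emod_of_pos (by norm_num)]
    push_cast [hm]
    omega
  have hbndB : PySem.Int.floordiv (PySem.Str.len bitstring) 2 * 2 = ((2 * m : Nat) : Int) := by
    rw [PySem.Str.len_eq, PySem.Int.floordiv_eq_ediv_of_pos (by norm_num)]
    push_cast [hm]
    omega
  rw [hbndA, hbndB, pv_pyRange_two]
  simp only [pv_enumerate_map, pv_enumerate_range, List.map_map, List.foldl_map,
    Function.comp_def]
  have hinv := pvFold_inv words n bitstring (List.range m)
      (g := PySem.Dict.empty) (b := PySem.Dict.empty)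
      ⟨by rfl, PySem.Dict.nodup_keys_empty⟩
  set gdict := (List.range m).foldl (fun g (k : Nat) => pvStepA words n g ((k : Int), PySem.Str.slice bitstring (some (0 + 2 * (k : Int))) (some (0 + 2 * (k : Int) + 2)))) PySem.Dict.empty with hg
  set bdict := (List.range m).foldl (fun b (k : Nat) => pvStepB words n bitstring b (0 + 2 * (k : Int))) PySem.Dict.empty with hb
  -- B's second pass rebuilds exactly A's groups dict
  have hnd : bdict.keys.Nodup := pv_nodup_out_keys words n bitstring (List.range m) PySem.Dict.nodup_keys_empty
  have hout : (bdict.items.foldl (fun (o : PySem.Dict String (List String)) p => o.insert p.1 (PySem.List.dedup p.2)) PySem.Dict.empty) = gdict := by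
    apply PySem.Dict.ext
    rw [PySem.Dict.items_foldl_insert_fresh bdict.items Prod.fst (fun p => PySem.List.dedup p.2)
        PySem.Dict.empty (fun a _ => PySem.Dict.contains_empty a.1) (by exact hnd)]
    rw [hinv.1]
    rfl
  rw [hout]

-- ===== VERDICT (by name: the statement is the Claim_ definition above) =====
theorem classify_full_stream_spec : Claim_equal_classify_full_stream := by
  intro words bitstring _ _
  unfold Spec_classify_full_stream
  exact classify_full_stream_eq words bitstring
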